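-- pv_equiv track=rewrite | github.com/YuvalRi/training | datastructures/datastruc_ex9.py | dimenstionaList
-- ===== SOURCE A (Python) =====
-- def dimenstionaList(m: int, n: int):
--     '''
--     A function which recieves 2 integers
--     and returns a 2-dimensional list of size mXn
--     '''
--     list1 = []
--     lists = []
--     for i in range(m):
--         lists.append(list1)
--     for i in range(m):
--         for j in range(m):
--             lists[j] = [i*j for i in range(n)]
--     return lists
-- ===== SOURCE B (Python) =====
-- def dimenstionaList(m: int, n: int):
--     return [[i * j for i in range(n)] for j in range(m)]
-- ===== Notes on version B (the rewrite author's own statement) =====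
-- stated objective: faster
-- what changed: B computes each row j directly as the comprehension [i*j for i in range(n)] in a single nested comprehension, eliminating A's aliased-empty-list prefill and A's redundant outer loop that rebuilds all m rows m times; this drops a factor of m.
import Mathlib
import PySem

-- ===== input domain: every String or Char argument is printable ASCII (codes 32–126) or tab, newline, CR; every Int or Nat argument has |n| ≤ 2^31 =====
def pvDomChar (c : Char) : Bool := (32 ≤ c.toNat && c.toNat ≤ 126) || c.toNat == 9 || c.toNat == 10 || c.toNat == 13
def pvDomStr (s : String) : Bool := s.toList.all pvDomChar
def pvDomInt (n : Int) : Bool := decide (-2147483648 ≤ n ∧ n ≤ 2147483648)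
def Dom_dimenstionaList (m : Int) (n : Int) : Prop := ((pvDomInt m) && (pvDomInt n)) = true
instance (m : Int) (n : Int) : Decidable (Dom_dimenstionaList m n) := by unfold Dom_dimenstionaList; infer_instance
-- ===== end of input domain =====

-- B replaces A's aliased prefill plus redundant m-fold rewriting of the rows by one direct nested comprehension (objective: faster).

-- ===== PORT A =====
-- Note: in A the inner comprehension '[i*j for i in range(n)]' shadows the outer i,
-- so every outer pass writes the same rows; the port is the literal loop structure.
def dimenstionaList (m : Int) (n : Int) : List (List Int) :=
  let list1 : List Int := []
  let lists := (PySem.List.pyRange 0 m 1).foldl (fun acc _ => acc ++ [list1]) []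
  (PySem.List.pyRange 0 m 1).foldl (fun ls _ =>
    (PySem.List.pyRange 0 m 1).foldl (fun ls2 j =>
      ls2.set j.toNat ((PySem.List.pyRange 0 n 1).map (fun i => i * j))) ls) lists

-- ===== PORT B =====
def dimenstionaList_alt (m : Int) (n : Int) : List (List Int) :=
  (PySem.List.pyRange 0 m 1).map (fun j => (PySem.List.pyRange 0 n 1).map (fun i => i * j))

-- ===== PRECONDITION & SPEC =====
def Spec_dimenstionaList (m : Int) (n : Int) (out : List (List Int)) : Prop := out = dimenstionaList_alt m n
instance (m : Int) (n : Int) (out : List (List Int)) : Decidable (Spec_dimenstionaList m n out) := by unfold Spec_dimenstionaList; infer_instance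

-- ===== CLAIM (what is proved, stated in full; the proofs are below) =====
def Claim_equal_dimenstionaList : Prop := ∀ (m : Int) (n : Int), Dom_dimenstionaList m n → Spec_dimenstionaList m n (dimenstionaList m n)

-- ===== LEMMAS AND PROOFS =====

lemma pvAppendFold (x : List Int) :
    ∀ (l : List Int) (acc : List (List Int)),
      l.foldl (fun a _ => a ++ [x]) acc = acc ++ List.replicate l.length x := by
  intro l
  induction l with
  | nil => simp
  | cons h t ih =>
    intro acc
    simp only [List.foldl, ih, List.length_cons]
    simp [List.append_assoc, List.replicate_succ]

-- a fold that writes f j at every position a..b-1 of a list of length b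
lemma pvSetFold (f : Int → List Int) :
    ∀ (k : ℕ) (a b : Int), 0 ≤ a → b = a + k →
    ∀ (ls : List (List Int)), ls.length = b.toNat →
      (PySem.List.pyRange a b 1).foldl (fun ls2 j => ls2.set j.toNat (f j)) ls
        = ls.take a.toNat ++ (PySem.List.pyRange a b 1).map f := by
  intro k
  induction k with
  | zero =>
    intro a b ha hb ls hlen
    subst hb
    simp only [Nat.cast_zero, add_zero] at *
    rw [PySem.List.pyRange_one_eq_nil le_rfl]
    simp [List.take_of_length_le (le_of_eq hlen)]
  | succ k ih =>
    intro a b ha hb ls hlen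
    have hab : a < b := by omega
    rw [PySem.List.pyRange_one_cons hab]
    simp only [List.foldl_cons, List.map_cons]
    have hlen' : (ls.set a.toNat (f a)).length = b.toNat := by simpa using hlen
    rw [ih (a + 1) b (by omega) (by omega) _ hlen']
    have haNat : a.toNat < ls.length := by rw [hlen]; omega
    have hsucc : (a + 1).toNat = a.toNat + 1 := by omega
    have htake : (ls.set a.toNat (f a)).take (a + 1).toNat
        = ls.take a.toNat ++ [f a] := by
      rw [hsucc, List.take_add_one, List.take_set, List.getElem?_set_self haNat,
        List.set_eq_of_length_le (by simp)]
      rfl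
    rw [htake, List.append_assoc]
    rfl

lemma pvOuter (g : List (List Int) → List (List Int)) (N : ℕ) (t : List (List Int))
    (hg : ∀ ls, ls.length = N → g ls = t) (ht : t.length = N) :
    ∀ (l : List Int) (ls : List (List Int)), ls.length = N → l ≠ [] →
      l.foldl (fun a _ => g a) ls = t := by
  intro l
  induction l with
  | nil => intro ls _ h; exact absurd rfl h
  | cons x xs ih =>
    intro ls hls _
    simp only [List.foldl_cons]
    rw [hg ls hls]
    cases xs with
    | nil => simp
    | cons y ys => exact ih t ht (by simp)

lemma pvAlt_length (m n : Int) : (dimenstionaList_alt m n).length = m.toNat := by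
  simp [dimenstionaList_alt, PySem.List.length_pyRange_one]

lemma pvInnerA (m n : Int) (ls : List (List Int)) (hm : 0 < m) (hlen : ls.length = m.toNat) :
    (PySem.List.pyRange 0 m 1).foldl
        (fun ls2 j => ls2.set j.toNat ((PySem.List.pyRange 0 n 1).map (fun i => i * j))) ls
      = dimenstionaList_alt m n := by
  have h := pvSetFold (fun j => (PySem.List.pyRange 0 n 1).map (fun i => i * j))
      m.toNat 0 m le_rfl (by omega) ls (by simpa using hlen)
  simpa [dimenstionaList_alt] using h

-- ===== VERDICT (by name: the statement is the Claim_ definition above) =====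
theorem dimenstionaList_spec : Claim_equal_dimenstionaList := by
  intro m n _
  simp only [Spec_dimenstionaList]
  by_cases hm : m ≤ 0
  · simp [dimenstionaList, dimenstionaList_alt, PySem.List.pyRange_one_eq_nil hm]
  · push Not at hm
    have hinit : (PySem.List.pyRange 0 m 1).foldl
        (fun acc _ => acc ++ [([] : List Int)]) [] = List.replicate m.toNat [] := by
      rw [pvAppendFold]; simp [PySem.List.length_pyRange_one]
    have hne : PySem.List.pyRange 0 m 1 ≠ [] := by
      rw [PySem.List.pyRange_one_cons hm]; simp
    simp only [dimenstionaList]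
    rw [hinit]
    exact pvOuter _ m.toNat (dimenstionaList_alt m n)
      (fun ls hls => pvInnerA m n ls hm hls) (pvAlt_length m n) _ _ (by simp) hne
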